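-- pv_equiv track=rewrite | github.com/ParkinsonLab/PopNet | MCLCounter.py | matchClusters
-- ===== SOURCE A (Python) =====
-- def matchClusters(lines, prevLines):
--     #the lines here are split. Returns a list of tuples with matching groups.
--     results = []
--     matched = []
--     for line in lines:
--         max = 0
--         match = []
--         for prevLine in prevLines:
--             curLength = len(set(line).intersection(set(prevLine)))
--             if curLength > max and prevLine not in matched:
--                 match = prevLine
--                 max = curLength
--         results.append((line, match))
--         matched.append(match)
--
--     for line in prevLines:
--         if line not in matched:
--             results.append(([], line))
--
--     return results
-- ===== SOURCE B (Python) =====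
-- def matchClusters(lines, prevLines):
--     # Inverted index: element -> list of prevLine indices whose set contains it;
--     # per-line overlap counts come from the index instead of pairwise set intersections.
--     index = {}
--     prevSets = [set(pl) for pl in prevLines]
--     for j, s in enumerate(prevSets):
--         for x in s:
--             index.setdefault(x, []).append(j)
--     results = []
--     matched = []
--     for line in lines:
--         counts = {}
--         for x in set(line):
--             for j in index.get(x, []):
--                 counts[j] = counts.get(j, 0) + 1
--         best = []
--         bestc = 0
--         for j, pl in enumerate(prevLines):
--             c = counts.get(j, 0)
--             if c > bestc and pl not in matched:
--                 best = pl
--                 bestc = c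
--         results.append((line, best))
--         matched.append(best)
--     for pl in prevLines:
--         if pl not in matched:
--             results.append(([], pl))
--     return results
-- ===== Notes on version B (the rewrite author's own statement) =====
-- stated objective: faster
-- what changed: Replaces the per-pair set-intersection computation with an inverted index (element -> prevLine indices) built once, from which each line's overlap counts per prevLine index are accumulated in a dict; the greedy best-match scan then only looks counts up by index.
import Mathlib
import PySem

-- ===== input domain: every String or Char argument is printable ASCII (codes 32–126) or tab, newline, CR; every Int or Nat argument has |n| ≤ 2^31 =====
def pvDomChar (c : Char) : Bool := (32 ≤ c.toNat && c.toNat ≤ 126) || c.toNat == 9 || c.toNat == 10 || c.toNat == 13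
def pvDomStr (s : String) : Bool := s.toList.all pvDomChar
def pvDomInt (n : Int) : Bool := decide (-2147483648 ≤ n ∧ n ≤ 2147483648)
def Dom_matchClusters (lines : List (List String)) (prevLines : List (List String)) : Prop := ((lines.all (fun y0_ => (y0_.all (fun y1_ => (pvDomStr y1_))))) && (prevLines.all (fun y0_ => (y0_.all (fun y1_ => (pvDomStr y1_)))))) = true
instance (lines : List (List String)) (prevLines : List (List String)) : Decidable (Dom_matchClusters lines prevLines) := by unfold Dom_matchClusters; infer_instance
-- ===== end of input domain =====

-- B replaces the per-pair set intersections with an inverted index (element -> prevLine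
-- indices) and per-line overlap counters; same greedy value-based matching, same results.


-- ===== PORT A =====
-- literal port: for each line scan prevLines keeping the strictly-better, not-yet-matched
-- (value-based) prevLine by intersection size; then append the unmatched prevLines.
def matchClusters (lines : List (List String)) (prevLines : List (List String)) : List (List String × List String) :=
  let st := lines.foldl
    (fun (st : List (List String × List String) × List (List String)) line =>
      let m := prevLines.foldl
        (fun (s : Nat × List String) prevLine =>
          let curLength := (PySem.Set.inter (PySem.Set.ofList line) (PySem.Set.ofList prevLine)).length
          if curLength > s.1 ∧ prevLine ∉ st.2 then (curLength, prevLine) else s)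
        (0, [])
      (st.1 ++ [(line, m.2)], st.2 ++ [m.2]))
    ([], [])
  prevLines.foldl (fun res l => if l ∉ st.2 then res ++ [([], l)] else res) st.1

-- ===== PORT B =====
-- inverted index: element -> the indices j of the prevLines whose set contains it
def pvIndex (prevLines : List (List String)) : PySem.Dict String (List Int) :=
  (PySem.List.enumerate (prevLines.map PySem.Set.ofList) 0).foldl
    (fun d js => js.2.foldl (fun d x => d.modify x [] (· ++ [js.1])) d)
    PySem.Dict.empty

-- per-line overlap counts keyed by prevLine index, accumulated from the index
def pvCounts (idx : PySem.Dict String (List Int)) (line : List String) : PySem.Dict Int Nat :=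
  (PySem.Set.ofList line).foldl
    (fun d x => (idx.getD x []).foldl (fun d j => d.modify j 0 (· + 1)) d)
    PySem.Dict.empty

def matchClusters_alt (lines : List (List String)) (prevLines : List (List String)) : List (List String × List String) :=
  let idx := pvIndex prevLines
  let st := lines.foldl
    (fun (st : List (List String × List String) × List (List String)) line =>
      let counts := pvCounts idx line
      let bm := (PySem.List.enumerate prevLines 0).foldl
        (fun (s : List String × Nat) jp =>
          let c := counts.getD jp.1 0
          if c > s.2 ∧ jp.2 ∉ st.2 then (jp.2, c) else s)
        ([], 0)
      (st.1 ++ [(line, bm.1)], st.2 ++ [bm.1]))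
    ([], [])
  prevLines.foldl (fun res pl => if pl ∉ st.2 then res ++ [([], pl)] else res) st.1

-- ===== PRECONDITION & SPEC =====
def Spec_matchClusters (lines : List (List String)) (prevLines : List (List String)) (out : List (List String × List String)) : Prop := out = matchClusters_alt lines prevLines
instance (lines : List (List String)) (prevLines : List (List String)) (out : List (List String × List String)) : Decidable (Spec_matchClusters lines prevLines out) := by unfold Spec_matchClusters; infer_instance

-- ===== CLAIM (what is proved, stated in full; the proofs are below) =====
def Claim_equal_matchClusters : Prop := ∀ (lines : List (List String)) (prevLines : List (List String)), Dom_matchClusters lines prevLines → Spec_matchClusters lines prevLines (matchClusters lines prevLines)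

-- ===== LEMMAS AND PROOFS =====

-- filtering a duplicate-free list by equality with x yields [x] iff x is present
theorem filter_beq_nodup (s : List String) (x : String) (hnd : s.Nodup) :
    (s.filter (fun y => y == x)) = if x ∈ s then [x] else [] := by
  induction s with
  | nil => simp
  | cons a t ih =>
    simp only [List.nodup_cons] at hnd
    rw [List.filter_cons]
    by_cases hax : a = x
    · subst hax
      have ht : t.filter (fun y => y == a) = [] := by
        rw [List.filter_eq_nil_iff]; intro y hy hya
        exact absurd (show a ∈ t by rwa [eq_of_beq hya] at hy) hnd.1
      simp [ht]
    · have hb : (a == x) = false := by simp [hax]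
      rw [hb, if_neg (by simp)]
      rw [ih hnd.2]
      simp [List.mem_cons, hax, Ne.symm]

-- one inner pass of the index-building loop appends j to the entry of each element of s
theorem inner_index (s : List String) (j : Int) (d : PySem.Dict String (List Int))
    (hnd : s.Nodup) (x : String) :
    ((s.foldl (fun d y => d.modify y [] (· ++ [j])) d).getD x []) =
      d.getD x [] ++ (if x ∈ s then [j] else []) := by
  have h1 : (s.foldl (fun d y => d.modify y [] (· ++ [j])) d)
      = ((s.map (fun y => (y, j))).foldl (fun d p => d.modify p.1 [] (· ++ [p.2])) d) := by
    rw [List.foldl_map]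
  rw [h1, PySem.Dict.getD_foldl_modify_append]
  congr 1
  have h2 : ((s.map (fun y => (y, j))).filter (fun p => p.1 == x))
      = (s.filter (fun y => y == x)).map (fun y => (y, j)) := by
    rw [List.filter_map]; rfl
  rw [h2, filter_beq_nodup s x hnd]
  split <;> simp

-- the finished index entry of x lists, in order, the indices of the sets containing x
theorem getD_index_fold (es : List (Int × List String)) (d : PySem.Dict String (List Int))
    (hnd : ∀ p ∈ es, (p.2 : List String).Nodup) (x : String) :
    ((es.foldl (fun d js => js.2.foldl (fun d y => d.modify y [] (· ++ [js.1])) d) d).getD x []) =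
      d.getD x [] ++ (es.filter (fun p => x ∈ p.2)).map (·.1) := by
  induction es generalizing d with
  | nil => simp
  | cons p t ih =>
    simp only [List.foldl_cons, List.filter_cons]
    rw [ih _ (fun q hq => hnd q (List.mem_cons_of_mem _ hq))]
    rw [inner_index p.2 p.1 d (hnd p (List.mem_cons_self)) x]
    by_cases hx : x ∈ p.2 <;> simp [hx]

theorem getD_pvIndex (prevLines : List (List String)) (x : String) :
    ((PySem.List.enumerate (prevLines.map PySem.Set.ofList) 0).foldl
      (fun d js => js.2.foldl (fun d y => d.modify y [] (· ++ [js.1])) d) PySem.Dict.empty).getD x [] =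
      ((PySem.List.enumerate (prevLines.map PySem.Set.ofList) 0).filter (fun p => x ∈ p.2)).map (·.1) := by
  rw [getD_index_fold]
  · simp
  · intro p hp
    rw [PySem.List.mem_enumerate_iff] at hp
    obtain ⟨k, hk, rfl⟩ := hp
    simp only [List.getElem_map]
    exact PySem.Set.nodup_ofList _

theorem fst_enumerate_ge (sets : List (List String)) (s : Int) (p : Int × List String)
    (hp : p ∈ PySem.List.enumerate sets s) : s ≤ p.1 := by
  rw [PySem.List.mem_enumerate_iff] at hp
  obtain ⟨k, hk, rfl⟩ := hp
  simp

-- the index entry of x mentions index j exactly once iff x is in the j-th set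
theorem count_index_list (sets : List (List String)) (s : Int) (j : Nat) (hj : j < sets.length) (x : String) :
    (((PySem.List.enumerate sets s).filter (fun p => x ∈ p.2)).map (·.1)).count (s + (j : Int)) =
      if x ∈ sets[j] then 1 else 0 := by
  induction sets generalizing s j with
  | nil => simp at hj
  | cons hd t ih =>
    rw [PySem.List.enumerate_cons, List.filter_cons]
    have hrest : (((PySem.List.enumerate t (s+1)).filter (fun p => x ∈ p.2)).map (·.1)).count s = 0 := by
      rw [List.count_eq_zero]
      intro hmem
      simp only [List.mem_map] at hmem
      obtain ⟨p, hp, hps⟩ := hmem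
      have := fst_enumerate_ge t (s+1) p (List.mem_of_mem_filter hp)
      omega
    cases j with
    | zero =>
      simp only [List.getElem_cons_zero, Int.natCast_zero, add_zero]
      by_cases hx : x ∈ hd
      · simp [hx, hrest]
      · simp [hx, hrest]
    | succ k =>
      have heq : s + ((k + 1 : Nat) : Int) = (s + 1) + (k : Int) := by push_cast; ring
      have ihk := ih (s+1) k (by simpa using hj)
      by_cases hx : x ∈ hd
      · simp only [hx, decide_true, if_pos, List.map_cons, List.count_cons]
        rw [heq] at *
        simp only [List.getElem_cons_succ]
        rw [ihk]
        have : ((s : Int) == s + 1 + (k:Int)) = false := by simp; omega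
        simp [this]
      · simp only [hx, decide_false, if_neg, Bool.false_eq_true, not_false_iff]
        rw [heq, List.getElem_cons_succ, ihk]

-- the counter value at j is the sum of j's multiplicities in the consulted index entries
theorem getD_counts_fold (xs : List String) (g : String → List Int) (d : PySem.Dict Int Nat) (j : Int) :
    ((xs.foldl (fun d x => (g x).foldl (fun d j' => d.modify j' 0 (· + 1)) d) d).getD j 0) =
      d.getD j 0 + (xs.map (fun x => (g x).count j)).sum := by
  induction xs generalizing d with
  | nil => simp
  | cons x t ih =>
    simp only [List.foldl_cons, List.map_cons, List.sum_cons]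
    rw [ih, PySem.Dict.getD_foldl_modify_add_one_nat]
    omega

theorem sum_ind (l : List String) (p : String → Bool) :
    (l.map (fun x => if p x then 1 else 0)).sum = l.countP p := by
  induction l with
  | nil => simp
  | cons a t ih => by_cases h : p a <;> simp [h, ih, Nat.add_comm]

-- the central fact: B's counter at index j is A's intersection size with prevLines[j]
theorem counts_eq_inter (prevLines : List (List String)) (line : List String)
    (j : Nat) (hj : j < prevLines.length) :
    (pvCounts (pvIndex prevLines) line).getD (j : Int) 0 =
      (PySem.Set.inter (PySem.Set.ofList line) (PySem.Set.ofList prevLines[j])).length := by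
  unfold pvCounts pvIndex
  rw [getD_counts_fold]
  rw [PySem.Dict.getD_empty]
  have hcnt : ∀ x : String,
      ((((PySem.List.enumerate (prevLines.map PySem.Set.ofList) 0).foldl
        (fun d js => js.2.foldl (fun d y => d.modify y [] (· ++ [js.1])) d) PySem.Dict.empty)).getD x []).count (j : Int)
      = if x ∈ PySem.Set.ofList prevLines[j] then 1 else 0 := by
    intro x
    rw [getD_pvIndex]
    have h0 : ((j : Nat) : Int) = 0 + (j : Int) := by omega
    rw [h0, count_index_list _ 0 j (by simpa using hj) x]
    simp
  simp only [hcnt]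
  have hs := sum_ind (PySem.Set.ofList line) (fun x => decide (x ∈ PySem.Set.ofList prevLines[j]))
  simp only [decide_eq_true_eq] at hs
  rw [hs]
  unfold PySem.Set.inter
  rw [Nat.zero_add, ← List.countP_eq_length_filter]
  apply List.countP_congr
  intro x _
  simp [PySem.Set.contains]

-- B's selection scan over enumerate(prevLines) equals (swapped) A's scan over prevLines
theorem select_eq (cnt : Int → Nat) (ilen : List String → Nat) (matched : List (List String))
    (pls : List (List String)) (s : Nat)
    (hc : ∀ k (hk : k < pls.length), cnt ((s + k : Nat) : Int) = ilen pls[k])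
    (acc : List String × Nat) :
    (PySem.List.enumerate pls (s : Int)).foldl
        (fun (t : List String × Nat) jp =>
          let c := cnt jp.1
          if c > t.2 ∧ jp.2 ∉ matched then (jp.2, c) else t) acc =
      Prod.swap (pls.foldl
        (fun (t : Nat × List String) pl =>
          let cur := ilen pl
          if cur > t.1 ∧ pl ∉ matched then (cur, pl) else t) (acc.2, acc.1)) := by
  induction pls generalizing s acc with
  | nil => simp [PySem.List.enumerate]
  | cons pl t ih =>
    rw [PySem.List.enumerate_cons, List.foldl_cons, List.foldl_cons]
    have h0 := hc 0 (by simp)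
    simp only [Nat.add_zero, List.getElem_cons_zero] at h0
    simp only [h0]
    have hst : (s : Int) + 1 = ((s + 1 : Nat) : Int) := by push_cast; ring
    rw [hst]
    by_cases hcase : ilen pl > acc.2 ∧ pl ∉ matched
    · rw [if_pos hcase, if_pos hcase]
      have := ih (s + 1) (fun k hk => by
        have := hc (k + 1) (by simpa using Nat.succ_lt_succ hk)
        simpa [Nat.add_assoc, Nat.add_comm 1 k] using this) ((pl, ilen pl))
      simpa using this
    · rw [if_neg hcase, if_neg hcase]
      exact ih (s + 1) (fun k hk => by
        have := hc (k + 1) (by simpa using Nat.succ_lt_succ hk)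
        simpa [Nat.add_assoc, Nat.add_comm 1 k] using this) acc

theorem main_eq (lines prevLines : List (List String)) :
    matchClusters lines prevLines = matchClusters_alt lines prevLines := by
  unfold matchClusters matchClusters_alt
  have hst : lines.foldl
      (fun (st : List (List String × List String) × List (List String)) line =>
        let m := prevLines.foldl
          (fun (s : Nat × List String) prevLine =>
            let curLength := (PySem.Set.inter (PySem.Set.ofList line) (PySem.Set.ofList prevLine)).length
            if curLength > s.1 ∧ prevLine ∉ st.2 then (curLength, prevLine) else s)
          (0, [])
        (st.1 ++ [(line, m.2)], st.2 ++ [m.2]))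
      ([], []) =
    lines.foldl
      (fun (st : List (List String × List String) × List (List String)) line =>
        let counts := pvCounts (pvIndex prevLines) line
        let bm := (PySem.List.enumerate prevLines 0).foldl
          (fun (s : List String × Nat) jp =>
            let c := counts.getD jp.1 0
            if c > s.2 ∧ jp.2 ∉ st.2 then (jp.2, c) else s)
          ([], 0)
        (st.1 ++ [(line, bm.1)], st.2 ++ [bm.1]))
      ([], []) := by
    apply PySem.List.foldl_congr_mem
    intro st line _
    have hsel := select_eq (fun i => (pvCounts (pvIndex prevLines) line).getD i 0)
      (fun pl => (PySem.Set.inter (PySem.Set.ofList line) (PySem.Set.ofList pl)).length)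
      st.2 prevLines 0
      (fun k hk => by simpa using counts_eq_inter prevLines line k hk)
      ([], 0)
    simp only [Nat.cast_zero] at hsel
    simp only [hsel]
    rfl
  rw [hst]

-- ===== VERDICT (by name: the statement is the Claim_ definition above) =====
theorem matchClusters_spec : Claim_equal_matchClusters := by
  intro lines prevLines _
  unfold Spec_matchClusters
  exact main_eq lines prevLines
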